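-- pv_equiv track=rewrite | github.com/ArchesLab/firstNestJS | my-research-project/converter.py | generate_plantuml
-- ===== SOURCE A (Python) =====
-- def generate_plantuml(data):
--     """Generates a PlantUML diagram from parsed data."""
--
--     components = ['gateway', 'auth', 'users', 'clubs', 'events', 'notifications']
--
--     # Filter out any components from the data that are not in the predefined list
--     data = [d for d in data if d['caller'] in components and d['target'] in components]
--
--     # Start of PlantUML diagram
--     plantuml_string = "@startuml\n"
--     plantuml_string += "!theme plain\n"
--     plantuml_string += "left to right direction\n"
--     plantuml_string += "skinparam componentStyle uml2\n"
--     plantuml_string += "skinparam nodesep 20\n"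
--     plantuml_string += "skinparam ranksep 150\n\n"
--
--     # Component alignment
--     plantuml_string += "' Force all components to stay on the same horizontal rank\n"
--     plantuml_string += "together {\n"
--     for comp in components:
--         plantuml_string += f"  component [{comp}] as {comp}\n"
--     plantuml_string += "}\n\n"
--
--     # Hidden links for ordering
--     plantuml_string += "' Maintain the horizontal sequence\n"
--     for i in range(len(components) - 1):
--         plantuml_string += f"{components[i]} -[hidden]r- {components[i+1]}\n"
--     plantuml_string += "\n"
--
--     # Port definitions
--     plantuml_string += "' --- Port Definitions ---\n\n"
--     ports = {}
--     port_counter = 1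
--     for comp in components:
--         comp_ports = [d for d in data if d['target'] == comp]
--         if comp_ports:
--             plantuml_string += f"component {comp} {{\n"
--             for i, port_data in enumerate(comp_ports):
--                 port_alias = f"{comp[0]}_p{i+1}"
--                 ports[(comp, port_data['path'])] = port_alias
--                 plantuml_string += f"    portin \"{port_data['path']}\" as {port_alias}\n"
--             plantuml_string += "}\n\n"
--
--     # Connections
--     plantuml_string += "' --- Connections ---\n\n"
--     for d in data:
--         if d['target'] in components:
--             target_port_alias = ports.get((d['target'], d['path']))
--             if target_port_alias:
--                 plantuml_string += f"{d['caller']} --> {target_port_alias} : {d['method']}\n"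
--
--     plantuml_string += "@enduml\n"
--
--     return plantuml_string
-- ===== SOURCE B (Python) =====
-- def generate_plantuml(data):
--     """Generates a PlantUML diagram from parsed data."""
--     components = ['gateway', 'auth', 'users', 'clubs', 'events', 'notifications']
--     data = [d for d in data if d['caller'] in components and d['target'] in components]
--
--     # One pass: group entries by target component (insertion order preserved).
--     groups = {}
--     for d in data:
--         groups.setdefault(d['target'], []).append(d)
--
--     lines = [
--         "@startuml",
--         "!theme plain",
--         "left to right direction",
--         "skinparam componentStyle uml2",
--         "skinparam nodesep 20",
--         "skinparam ranksep 150",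
--         "",
--         "' Force all components to stay on the same horizontal rank",
--         "together {",
--     ]
--     lines += [f"  component [{c}] as {c}" for c in components]
--     lines += ["}", "", "' Maintain the horizontal sequence"]
--     lines += [f"{a} -[hidden]r- {b}" for a, b in zip(components, components[1:])]
--     lines += ["", "' --- Port Definitions ---", ""]
--
--     ports = {}
--     for comp in components:
--         entries = groups.get(comp, [])
--         if entries:
--             lines.append(f"component {comp} {{")
--             for i, d in enumerate(entries, 1):
--                 alias = f"{comp[0]}_p{i}"
--                 ports[(comp, d['path'])] = alias
--                 lines.append(f"    portin \"{d['path']}\" as {alias}")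
--             lines += ["}", ""]
--
--     lines += ["' --- Connections ---", ""]
--     for d in data:
--         alias = ports.get((d['target'], d['path']))
--         if alias:
--             lines.append(f"{d['caller']} --> {alias} : {d['method']}")
--
--     lines.append("@enduml")
--     return "\n".join(lines) + "\n"
-- ===== Notes on version B (the rewrite author's own statement) =====
-- stated objective: idiomatic
-- what changed: B builds a target->entries index in one pass and looks groups up per component instead of re-filtering the data for every component, and assembles the output as a list of lines joined once instead of repeated string concatenation.
import Mathlib
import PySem

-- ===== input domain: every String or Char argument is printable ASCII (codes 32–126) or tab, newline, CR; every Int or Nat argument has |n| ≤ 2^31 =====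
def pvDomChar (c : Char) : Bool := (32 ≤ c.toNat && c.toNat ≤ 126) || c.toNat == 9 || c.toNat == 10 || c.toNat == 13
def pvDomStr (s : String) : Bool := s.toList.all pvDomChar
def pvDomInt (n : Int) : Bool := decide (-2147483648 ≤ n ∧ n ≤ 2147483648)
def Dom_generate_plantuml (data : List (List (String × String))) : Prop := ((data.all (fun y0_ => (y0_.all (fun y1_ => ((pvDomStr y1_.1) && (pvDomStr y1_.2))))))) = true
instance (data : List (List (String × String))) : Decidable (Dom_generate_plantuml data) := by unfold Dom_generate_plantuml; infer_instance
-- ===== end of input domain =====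

-- B groups the filtered entries by target once and assembles the diagram as a joined list of lines,
-- instead of A's per-component re-filtering of the data and repeated string concatenation (objective: idiomatic).
-- Each Python dict entry is the association list of its items; lookup is first match (PySem.Dict.mk).

-- shared helpers (constants / dict lookup used by both Pythons)
def pvComponents : List String := ["gateway", "auth", "users", "clubs", "events", "notifications"]

def pvGet (d : List (String × String)) (k : String) : String := (PySem.Dict.mk d).getD k ""

def pvHasKey (d : List (String × String)) (k : String) : Bool := (PySem.Dict.mk d).contains k

abbrev PvPorts := PySem.Dict (String × String) String

-- ===== PORT A =====
-- inner loop of A's port-definitions section: `for i, port_data in enumerate(comp_ports)`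
def pvPortLoopA (comp : String) (st : String × PvPorts × Int) (d : List (String × String)) : String × PvPorts × Int :=
  let port_alias := (match PySem.Str.pyGet? comp 0 with | some c => String.singleton c | none => "") ++ "_p" ++ PySem.Int.toStr (st.2.2 + 1)
  (st.1 ++ "    portin \"" ++ pvGet d "path" ++ "\" as " ++ port_alias ++ "\n",
   st.2.1.insert (comp, pvGet d "path") port_alias, st.2.2 + 1)

-- body of A's `for comp in components` port-definitions loop
def pvCompLoopA (data : List (List (String × String))) (sp : String × PvPorts) (comp : String) : String × PvPorts :=
  let comp_ports := data.filter (fun d => pvGet d "target" == comp)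
  if comp_ports.isEmpty then sp
  else
    let st := comp_ports.foldl (pvPortLoopA comp) (sp.1 ++ "component " ++ comp ++ " {\n", sp.2, 0)
    (st.1 ++ "}\n\n", st.2.1)

-- body of A's connections loop
def pvConnLoopA (ports : PvPorts) (s : String) (d : List (String × String)) : String :=
  if pvComponents.contains (pvGet d "target") then
    match ports.get? (pvGet d "target", pvGet d "path") with
    | some target_port_alias =>
        if target_port_alias ≠ "" then
          s ++ pvGet d "caller" ++ " --> " ++ target_port_alias ++ " : " ++ pvGet d "method" ++ "\n"
        else s
    | none => s
  else s

def generate_plantuml (data : List (List (String × String))) : String :=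
  let components := pvComponents
  let data := data.filter (fun d => components.contains (pvGet d "caller") && components.contains (pvGet d "target"))
  let s := "@startuml\n"
  let s := s ++ "!theme plain\n"
  let s := s ++ "left to right direction\n"
  let s := s ++ "skinparam componentStyle uml2\n"
  let s := s ++ "skinparam nodesep 20\n"
  let s := s ++ "skinparam ranksep 150\n\n"
  let s := s ++ "' Force all components to stay on the same horizontal rank\n"
  let s := s ++ "together {\n"
  let s := components.foldl (fun s comp => s ++ "  component [" ++ comp ++ "] as " ++ comp ++ "\n") s
  let s := s ++ "}\n\n"
  let s := s ++ "' Maintain the horizontal sequence\n"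
  let s := (PySem.List.pyRange 0 ((components.length : Int) - 1) 1).foldl
      (fun s i => s ++ PySem.List.pyGetD components i "" ++ " -[hidden]r- " ++ PySem.List.pyGetD components (i + 1) "" ++ "\n") s
  let s := s ++ "\n"
  let s := s ++ "' --- Port Definitions ---\n\n"
  let sp := components.foldl (pvCompLoopA data) (s, (PySem.Dict.empty : PvPorts))
  let s := sp.1 ++ "' --- Connections ---\n\n"
  let s := data.foldl (pvConnLoopA sp.2) s
  s ++ "@enduml\n"

-- ===== PORT B =====
-- inner loop of B's port-definitions section: `for i, d in enumerate(entries, 1)`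
def pvPortLoopB (comp : String) (st : List String × PvPorts × Int) (d : List (String × String)) : List String × PvPorts × Int :=
  let al := (match PySem.Str.pyGet? comp 0 with | some c => String.singleton c | none => "") ++ "_p" ++ PySem.Int.toStr st.2.2
  (st.1 ++ ["    portin \"" ++ pvGet d "path" ++ "\" as " ++ al],
   st.2.1.insert (comp, pvGet d "path") al, st.2.2 + 1)

-- body of B's `for comp in components` loop, looking the prebuilt group index up
def pvCompLoopB (groups : PySem.Dict String (List (List (String × String)))) (lp : List String × PvPorts) (comp : String) : List String × PvPorts :=
  let entries := groups.getD comp []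
  if entries.isEmpty then lp
  else
    let st := entries.foldl (pvPortLoopB comp) ([], lp.2, 1)
    (lp.1 ++ ("component " ++ comp ++ " {") :: st.1 ++ ["}", ""], st.2.1)

-- body of B's connections loop
def pvConnLoopB (ports : PvPorts) (ls : List String) (d : List (String × String)) : List String :=
  match ports.get? (pvGet d "target", pvGet d "path") with
  | some al =>
      if al ≠ "" then ls ++ [pvGet d "caller" ++ " --> " ++ al ++ " : " ++ pvGet d "method"] else ls
  | none => ls

def generate_plantuml_alt (data : List (List (String × String))) : String :=
  let components := pvComponents
  let filtered := data.filter (fun d => components.contains (pvGet d "caller") && components.contains (pvGet d "target"))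
  let groups := filtered.foldl (fun g d => g.modify (pvGet d "target") [] (fun l => l ++ [d])) PySem.Dict.empty
  let lines := ["@startuml", "!theme plain", "left to right direction",
    "skinparam componentStyle uml2", "skinparam nodesep 20", "skinparam ranksep 150", "",
    "' Force all components to stay on the same horizontal rank", "together {"]
  let lines := lines ++ components.map (fun c => "  component [" ++ c ++ "] as " ++ c)
  let lines := lines ++ ["}", "", "' Maintain the horizontal sequence"]
  let lines := lines ++ (components.zip components.tail).map (fun p => p.1 ++ " -[hidden]r- " ++ p.2)
  let lines := lines ++ ["", "' --- Port Definitions ---", ""]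
  let lp := components.foldl (pvCompLoopB groups) (lines, (PySem.Dict.empty : PvPorts))
  let lines := lp.1 ++ ["' --- Connections ---", ""]
  let lines := filtered.foldl (pvConnLoopB lp.2) lines
  let lines := lines ++ ["@enduml"]
  PySem.Str.join "\n" lines ++ "\n"

-- ===== PRECONDITION & SPEC =====
-- Pre_ excludes exactly the inputs where the Python raises KeyError: an entry missing 'caller',
-- or (once its caller is a known component) missing 'target', or (once also its target is a known
-- component, i.e. the entry survives the filter) missing 'path' or 'method'.
def Pre_generate_plantuml (data : List (List (String × String))) : Prop :=
  (data.all (fun d =>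
    pvHasKey d "caller" &&
      (!(pvComponents.contains (pvGet d "caller")) ||
        (pvHasKey d "target" &&
          (!(pvComponents.contains (pvGet d "target")) ||
            (pvHasKey d "path" && pvHasKey d "method")))))) = true
instance (data : List (List (String × String))) : Decidable (Pre_generate_plantuml data) := by
  unfold Pre_generate_plantuml; infer_instance

def pvWitness_generate_plantuml : (List (List (String × String))) :=
  ([[("caller", "gateway"), ("target", "auth"), ("path", "/login"), ("method", "POST")],
    [("caller", "other"), ("x", "y")]])

def Spec_generate_plantuml (data : List (List (String × String))) (out : String) : Prop := out = generate_plantuml_alt data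
instance (data : List (List (String × String))) (out : String) : Decidable (Spec_generate_plantuml data out) := by unfold Spec_generate_plantuml; infer_instance

-- ===== CLAIM (what is proved, stated in full; the proofs are below) =====
def Claim_equal_generate_plantuml : Prop := ∀ (data : List (List (String × String))), Dom_generate_plantuml data → Pre_generate_plantuml data → Spec_generate_plantuml data (generate_plantuml data)

-- ===== LEMMAS AND PROOFS =====

-- the fixed header both programs emit (closed values, checked by decide)
def pvHdrLines : List String := ["@startuml", "!theme plain", "left to right direction", "skinparam componentStyle uml2", "skinparam nodesep 20", "skinparam ranksep 150", "", "' Force all components to stay on the same horizontal rank", "together {", "  component [gateway] as gateway", "  component [auth] as auth", "  component [users] as users", "  component [clubs] as clubs", "  component [events] as events", "  component [notifications] as notifications", "}", "", "' Maintain the horizontal sequence", "gateway -[hidden]r- auth", "auth -[hidden]r- users", "users -[hidden]r- clubs", "clubs -[hidden]r- events", "events -[hidden]r- notifications", "", "' --- Port Definitions ---", ""]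

def pvHdrStr : String := "@startuml\n!theme plain\nleft to right direction\nskinparam componentStyle uml2\nskinparam nodesep 20\nskinparam ranksep 150\n\n' Force all components to stay on the same horizontal rank\ntogether {\n  component [gateway] as gateway\n  component [auth] as auth\n  component [users] as users\n  component [clubs] as clubs\n  component [events] as events\n  component [notifications] as notifications\n}\n\n' Maintain the horizontal sequence\ngateway -[hidden]r- auth\nauth -[hidden]r- users\nusers -[hidden]r- clubs\nclubs -[hidden]r- events\nevents -[hidden]r- notifications\n\n' --- Port Definitions ---\n\n"

-- "lines joined by newline, each line terminated": the shape both outputs reduce to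
def pvNl : List String → String
  | [] => ""
  | l :: ls => l ++ "\n" ++ pvNl ls
theorem pvNl_append (a b : List String) : pvNl (a ++ b) = pvNl a ++ pvNl b := by
  induction a with
  | nil => simp [pvNl]
  | cons x xs ih => simp [pvNl, ih, String.append_assoc]

theorem pvJoin_nl (x : String) (ls : List String) :
    PySem.Str.join "\n" (x :: ls) ++ "\n" = pvNl (x :: ls) := by
  induction ls generalizing x with
  | nil =>
      apply String.toList_inj.mp
      simp [PySem.Str.join, PySem.Chars.join_singleton, pvNl]
  | cons y ys ih =>
      apply String.toList_inj.mp
      rw [pvNl, ← ih y]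
      simp [PySem.Str.join, PySem.Chars.join_cons_cons]

theorem pvGroups_getD (l : List (List (String × String))) (comp : String) :
    (l.foldl (fun g d => g.modify (pvGet d "target") [] (fun l => l ++ [d])) PySem.Dict.empty).getD comp []
      = l.filter (fun d => pvGet d "target" == comp) := by
  have h := PySem.Dict.getD_foldl_modify_append
      (l := l.map (fun d => (pvGet d "target", d))) (d := PySem.Dict.empty) (c := comp)
  rw [List.foldl_map] at h
  rw [h]
  simp [List.filter_map, Function.comp_def]

theorem pvInnerB_shift (comp : String) (entries : List (List (String × String)))
    (ls : List String) (ports : PvPorts) (i : Int) :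
    entries.foldl (pvPortLoopB comp) (ls, ports, i)
      = (ls ++ (entries.foldl (pvPortLoopB comp) ([], ports, i)).1,
         (entries.foldl (pvPortLoopB comp) ([], ports, i)).2) := by
  induction entries generalizing ls ports i with
  | nil => simp
  | cons d rest ih =>
      simp only [List.foldl_cons, pvPortLoopB, List.nil_append]
      rw [ih, ih (ls := [_])]
      simp

theorem pvInner_eq (comp : String) (entries : List (List (String × String)))
    (s : String) (ports : PvPorts) (i : Int) :
    (entries.foldl (pvPortLoopA comp) (s, ports, i)).1
        = s ++ pvNl (entries.foldl (pvPortLoopB comp) ([], ports, i + 1)).1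
      ∧ (entries.foldl (pvPortLoopA comp) (s, ports, i)).2.1
        = (entries.foldl (pvPortLoopB comp) ([], ports, i + 1)).2.1 := by
  induction entries generalizing s ports i with
  | nil => simp [pvNl]
  | cons d rest ih =>
      simp only [List.foldl_cons, pvPortLoopA, pvPortLoopB]
      rw [pvInnerB_shift]
      obtain ⟨h1, h2⟩ := ih (s := s ++ "    portin \"" ++ pvGet d "path" ++ "\" as " ++
        ((match PySem.Str.pyGet? comp 0 with | some c => String.singleton c | none => "") ++ "_p" ++ PySem.Int.toStr (i + 1)) ++ "\n")
        (ports := ports.insert (comp, pvGet d "path")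
          ((match PySem.Str.pyGet? comp 0 with | some c => String.singleton c | none => "") ++ "_p" ++ PySem.Int.toStr (i + 1)))
        (i := i + 1)
      constructor
      · rw [h1]
        simp [pvNl, String.append_assoc]
      · rw [h2]

theorem pvCompB_shift (groups : PySem.Dict String (List (List (String × String))))
    (comps : List String) (ls : List String) (ports : PvPorts) :
    comps.foldl (pvCompLoopB groups) (ls, ports)
      = (ls ++ (comps.foldl (pvCompLoopB groups) ([], ports)).1,
         (comps.foldl (pvCompLoopB groups) ([], ports)).2) := by
  induction comps generalizing ls ports with
  | nil => simp
  | cons c rest ih =>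
      simp only [List.foldl_cons, pvCompLoopB, List.nil_append]
      by_cases h : (groups.getD c []).isEmpty = true
      · rw [if_pos h, if_pos h]
        exact ih ls ports
      · rw [if_neg h, if_neg h]
        rw [ih]
        conv_rhs => rw [ih]
        simp

theorem pvComp_eq (dfil : List (List (String × String)))
    (groups : PySem.Dict String (List (List (String × String))))
    (hg : ∀ comp, groups.getD comp [] = dfil.filter (fun d => pvGet d "target" == comp)) :
    ∀ (comps : List String) (s : String) (ports : PvPorts),
    (comps.foldl (pvCompLoopA dfil) (s, ports)).1
        = s ++ pvNl (comps.foldl (pvCompLoopB groups) ([], ports)).1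
      ∧ (comps.foldl (pvCompLoopA dfil) (s, ports)).2
        = (comps.foldl (pvCompLoopB groups) ([], ports)).2 := by
  intro comps
  induction comps with
  | nil => intro s ports; simp [pvNl]
  | cons c rest ih =>
      intro s ports
      simp only [List.foldl_cons, pvCompLoopA, pvCompLoopB, hg c, List.nil_append]
      by_cases h : (dfil.filter (fun d => pvGet d "target" == c)).isEmpty
      · simp only [h, if_true]
        exact ih s ports
      · simp only [h, Bool.false_eq_true, if_false]
        obtain ⟨h1, h2⟩ := pvInner_eq c (dfil.filter (fun d => pvGet d "target" == c))
          (s ++ "component " ++ c ++ " {\n") ports 0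
        norm_num at h1 h2
        rw [pvCompB_shift groups rest]
        obtain ⟨g1, g2⟩ := ih
          (((dfil.filter (fun d => pvGet d "target" == c)).foldl (pvPortLoopA c)
              (s ++ "component " ++ c ++ " {\n", ports, 0)).1 ++ "}\n\n")
          (((dfil.filter (fun d => pvGet d "target" == c)).foldl (pvPortLoopA c)
              (s ++ "component " ++ c ++ " {\n", ports, 0)).2.1)
        constructor
        · rw [g1, h1, h2]
          simp [pvNl_append, pvNl, String.append_assoc]
          rw [← String.append_assoc (s₁ := "}\n") (s₂ := "\n"), show ("}\n" : String) ++ "\n" = "}\n\n" from rfl]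
        · rw [g2, h2]

theorem pvConnB_shift (ports : PvPorts) (l : List (List (String × String))) (ls : List String) :
    l.foldl (pvConnLoopB ports) ls = ls ++ l.foldl (pvConnLoopB ports) [] := by
  induction l generalizing ls with
  | nil => simp
  | cons d rest ih =>
      simp only [List.foldl_cons, pvConnLoopB, List.nil_append]
      cases hq : ports.get? (pvGet d "target", pvGet d "path") with
      | none => exact ih ls
      | some al =>
          by_cases he : al ≠ ""
          · simp only [if_pos he]
            rw [ih, ih (ls := [_])]
            simp
          · simp only [if_neg he]
            exact ih ls

theorem pvConn_eq (ports : PvPorts) (l : List (List (String × String)))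
    (h : ∀ d ∈ l, pvComponents.contains (pvGet d "target") = true) :
    ∀ s : String, l.foldl (pvConnLoopA ports) s = s ++ pvNl (l.foldl (pvConnLoopB ports) []) := by
  induction l with
  | nil => intro s; simp [pvNl]
  | cons d rest ih =>
      intro s
      have hd := h d (List.mem_cons_self ..)
      have hrest : ∀ d ∈ rest, pvComponents.contains (pvGet d "target") = true :=
        fun x hx => h x (List.mem_cons_of_mem _ hx)
      simp only [List.foldl_cons, pvConnLoopA, pvConnLoopB, if_pos hd, List.nil_append]
      cases hq : ports.get? (pvGet d "target", pvGet d "path") with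
      | none => exact ih hrest s
      | some al =>
          by_cases he : al ≠ ""
          · simp only [if_pos he]
            rw [pvConnB_shift, ih hrest, pvNl_append]
            simp [pvNl, String.append_assoc]
          · simp only [if_neg he]
            exact ih hrest s

-- ===== VERDICT (by name: the statement is the Claim_ definition above) =====
theorem pvJoin_nl_ne (ls : List String) (h : ls ≠ []) :
    PySem.Str.join "\n" ls ++ "\n" = pvNl ls := by
  cases ls with
  | nil => exact absurd rfl h
  | cons x xs => exact pvJoin_nl x xs

set_option maxRecDepth 16384 in
theorem generate_plantuml_spec : Claim_equal_generate_plantuml := by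
  intro data _ _
  unfold Spec_generate_plantuml generate_plantuml generate_plantuml_alt
  simp only []
  have hmem : ∀ d ∈ data.filter (fun d => pvComponents.contains (pvGet d "caller") &&
      pvComponents.contains (pvGet d "target")), pvComponents.contains (pvGet d "target") = true := by
    intro d hd
    exact (Bool.and_eq_true_iff.mp (List.mem_filter.mp hd).2).2
  obtain ⟨c1, c2⟩ := pvComp_eq
    (data.filter (fun d => pvComponents.contains (pvGet d "caller") && pvComponents.contains (pvGet d "target")))
    _
    (pvGroups_getD (data.filter (fun d => pvComponents.contains (pvGet d "caller") && pvComponents.contains (pvGet d "target"))))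
    pvComponents
    (List.foldl
        (fun s i => s ++ PySem.List.pyGetD pvComponents i "" ++ " -[hidden]r- " ++ PySem.List.pyGetD pvComponents (i + 1) "" ++ "\n")
        (List.foldl (fun s comp => s ++ "  component [" ++ comp ++ "] as " ++ comp ++ "\n")
            ("@startuml\n" ++ "!theme plain\n" ++ "left to right direction\n" ++ "skinparam componentStyle uml2\n" ++
              "skinparam nodesep 20\n" ++ "skinparam ranksep 150\n\n" ++
              "' Force all components to stay on the same horizontal rank\n" ++ "together {\n")
            pvComponents ++ "}\n\n" ++ "' Maintain the horizontal sequence\n")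
        (PySem.List.pyRange 0 ((pvComponents.length : Int) - 1)) ++ "\n" ++ "' --- Port Definitions ---\n\n")
    PySem.Dict.empty
  rw [c1, c2]
  conv_rhs => rw [pvCompB_shift, pvConnB_shift]
  rw [pvConn_eq _ _ hmem]
  dsimp only
  rw [pvJoin_nl_ne _ (by simp)]
  rw [show (["@startuml", "!theme plain", "left to right direction",
      "skinparam componentStyle uml2", "skinparam nodesep 20", "skinparam ranksep 150", "",
      "' Force all components to stay on the same horizontal rank", "together {"] ++
    pvComponents.map (fun c => "  component [" ++ c ++ "] as " ++ c) ++
    ["}", "", "' Maintain the horizontal sequence"] ++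
    (pvComponents.zip pvComponents.tail).map (fun p => p.1 ++ " -[hidden]r- " ++ p.2) ++
    ["", "' --- Port Definitions ---", ""]) = pvHdrLines from by decide]
  simp only [pvNl_append]
  rw [show pvNl pvHdrLines = pvHdrStr from by decide,
      show pvNl ["' --- Connections ---", ""] = "' --- Connections ---\n\n" from by decide,
      show pvNl ["@enduml"] = "@enduml\n" from by decide,
      show (List.foldl
        (fun s i => s ++ PySem.List.pyGetD pvComponents i "" ++ " -[hidden]r- " ++ PySem.List.pyGetD pvComponents (i + 1) "" ++ "\n")
        (List.foldl (fun s comp => s ++ "  component [" ++ comp ++ "] as " ++ comp ++ "\n")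
            ("@startuml\n" ++ "!theme plain\n" ++ "left to right direction\n" ++ "skinparam componentStyle uml2\n" ++
              "skinparam nodesep 20\n" ++ "skinparam ranksep 150\n\n" ++
              "' Force all components to stay on the same horizontal rank\n" ++ "together {\n")
            pvComponents ++ "}\n\n" ++ "' Maintain the horizontal sequence\n")
        (PySem.List.pyRange 0 ((pvComponents.length : Int) - 1)) ++ "\n" ++ "' --- Port Definitions ---\n\n") = pvHdrStr from by decide]
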